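-- pv_equiv track=rewrite | github.com/francis4531/Offerwise | negotiation_hub.py | _parse_counters
-- ===== SOURCE A (Python) =====
-- from typing import Dict, Any, List, Optional
--
-- def _parse_counters(text: str) -> List[Dict]:
--     """Parse counter strategies."""
--     strategies = []
--     current = {}
--
--     for line in text.split('\n'):
--         line = line.strip()
--         if not line:
--             if 'objection' in current:
--                 strategies.append(current)
--                 current = {}
--             continue
--
--         lower = line.lower()
--         if 'objection' in lower and ':' in line:
--             if 'objection' in current:
--                 strategies.append(current)
--             current = {'objection': line.split(':', 1)[1].strip()}
--         elif 'response' in lower and ':' in line: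
--             current['response'] = line.split(':', 1)[1].strip()
--
--     if 'objection' in current:
--         strategies.append(current)
--
--     return strategies[:5]
-- ===== SOURCE B (Python) =====
-- from typing import Dict, Any, List, Optional
--
-- def _parse_counters(text: str) -> List[Dict]:
--     """Parse counter strategies: group lines into blank-separated blocks, then scan each block."""
--     # Phase 1: split into blocks of consecutive non-blank (stripped) lines.
--     blocks, cur = [], []
--     for raw in text.split('\n'):
--         s = raw.strip()
--         if s:
--             cur.append(s)
--         elif cur:
--             blocks.append(cur)
--             cur = []
--     if cur:
--         blocks.append(cur)
--
--     # Phase 2: scan each block independently.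
--     strategies = []
--     for block in blocks:
--         current = None
--         for s in block:
--             lower = s.lower()
--             if 'objection' in lower and ':' in s:
--                 if current is not None:
--                     strategies.append(current)
--                 current = {'objection': s.split(':', 1)[1].strip()}
--             elif current is not None and 'response' in lower and ':' in s:
--                 current['response'] = s.split(':', 1)[1].strip()
--         if current is not None:
--             strategies.append(current)
--
--     return strategies[:5]
-- ===== Notes on version B (the rewrite author's own statement) =====
-- stated objective: alternative
-- what changed: B first groups the stripped lines into blank-separated blocks and then scans each block independently with an Option-valued current dict (outer loop over blocks, inner loop over lines), instead of A's single flat fold over all lines with a plain dict that silently carries response-only state across blanks.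
import Mathlib
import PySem

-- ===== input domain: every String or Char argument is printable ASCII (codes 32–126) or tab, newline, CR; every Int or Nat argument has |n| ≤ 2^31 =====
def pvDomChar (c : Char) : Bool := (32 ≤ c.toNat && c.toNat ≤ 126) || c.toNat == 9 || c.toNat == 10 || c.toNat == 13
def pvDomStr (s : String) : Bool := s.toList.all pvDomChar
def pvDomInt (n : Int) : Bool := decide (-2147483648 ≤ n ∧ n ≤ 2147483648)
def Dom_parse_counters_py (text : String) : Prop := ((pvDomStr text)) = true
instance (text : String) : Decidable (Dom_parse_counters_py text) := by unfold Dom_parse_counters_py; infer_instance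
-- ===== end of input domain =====

-- B regroups the lines into blank-separated blocks and scans each block with an Option current;
-- same return value as A on every input (objective: alternative decomposition, no speed claim).

-- shared line-level helpers (identical sub-expressions of both Pythons)
-- line.split(':', 1)[1].strip()  (only used under ':' in line, where the piece exists)
def pvAfter (s : String) : String :=
  PySem.Str.strip (((PySem.Str.splitMax? s ":" 1).getD []).getD 1 "")
-- 'objection' in line.lower() and ':' in line
def pvIsObj (s : String) : Bool :=
  PySem.Str.isIn "objection" (PySem.Str.lower s) && PySem.Str.isIn ":" s
-- 'response' in line.lower() and ':' in line
def pvIsResp (s : String) : Bool :=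
  PySem.Str.isIn "response" (PySem.Str.lower s) && PySem.Str.isIn ":" s

-- ===== PORT A =====
-- A's loop body: state = (strategies, current dict)
def pvAStep (st : List (List (String × String)) × PySem.Dict String String) (raw : String) :
    List (List (String × String)) × PySem.Dict String String :=
  let line := PySem.Str.strip raw
  if line = "" then
    if st.2.contains "objection" then (st.1 ++ [st.2.items], PySem.Dict.empty) else st
  else if pvIsObj line then
    ((if st.2.contains "objection" then st.1 ++ [st.2.items] else st.1),
     PySem.Dict.ofList [("objection", pvAfter line)])
  else if pvIsResp line then
    (st.1, st.2.insert "response" (pvAfter line))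
  else st

def parse_counters_py (text : String) : List (List (String × String)) :=
  let fin := ((PySem.Str.split? text "\n").getD []).foldl pvAStep ([], PySem.Dict.empty)
  let strategies := if fin.2.contains "objection" then fin.1 ++ [fin.2.items] else fin.1
  PySem.List.slice strategies none (some 5)

-- ===== PORT B =====
-- B phase 1 loop body: state = (finished blocks, current block of stripped lines)
def pvBlockStep (st : List (List String) × List String) (raw : String) :
    List (List String) × List String :=
  let s := PySem.Str.strip raw
  if s ≠ "" then (st.1, st.2 ++ [s])
  else if st.2 ≠ [] then (st.1 ++ [st.2], ([] : List String))
  else st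

-- B phase 2 inner loop body: state = (strategies, optional current dict)
def pvInner (st : List (List (String × String)) × Option (PySem.Dict String String)) (s : String) :
    List (List (String × String)) × Option (PySem.Dict String String) :=
  if pvIsObj s then
    ((match st.2 with | some d => st.1 ++ [d.items] | none => st.1),
     some (PySem.Dict.ofList [("objection", pvAfter s)]))
  else if st.2.isSome && pvIsResp s then
    (st.1, st.2.map (fun d => d.insert "response" (pvAfter s)))
  else st

-- B outer loop body: one whole block
def pvProc (acc : List (List (String × String))) (block : List String) :
    List (List (String × String)) :=
  let r := block.foldl pvInner (acc, none)
  match r.2 with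
  | some d => r.1 ++ [d.items]
  | none => r.1

def parse_counters_py_alt (text : String) : List (List (String × String)) :=
  let bl := ((PySem.Str.split? text "\n").getD []).foldl pvBlockStep ([], [])
  let blocks := if bl.2 ≠ [] then bl.1 ++ [bl.2] else bl.1
  let strategies := blocks.foldl pvProc []
  PySem.List.slice strategies none (some 5)

-- ===== PRECONDITION & SPEC =====
def Spec_parse_counters_py (text : String) (out : List (List (String × String))) : Prop := out = parse_counters_py_alt text
instance (text : String) (out : List (List (String × String))) : Decidable (Spec_parse_counters_py text out) := by unfold Spec_parse_counters_py; infer_instance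

-- ===== CLAIM (what is proved, stated in full; the proofs are below) =====
def Claim_equal_parse_counters_py : Prop := ∀ (text : String), Dom_parse_counters_py text → Spec_parse_counters_py text (parse_counters_py text)

-- ===== LEMMAS AND PROOFS =====

-- common streaming semantics both ports are reduced to
def pvFlush : Option (PySem.Dict String String) → List (List (String × String))
  | some d => [d.items]
  | none => []

def pvRun : Option (PySem.Dict String String) → List String → List (List (String × String))
  | copt, [] => pvFlush copt
  | copt, raw :: ls =>
    let s := PySem.Str.strip raw
    if s = "" then pvFlush copt ++ pvRun none ls
    else if pvIsObj s then
      pvFlush copt ++ pvRun (some (PySem.Dict.ofList [("objection", pvAfter s)])) ls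
    else if pvIsResp s then pvRun (copt.map (fun d => d.insert "response" (pvAfter s))) ls
    else pvRun copt ls

-- relation between A's raw dict state and the streaming Option state
def pvRel (cur : PySem.Dict String String) (copt : Option (PySem.Dict String String)) : Prop :=
  match copt with
  | none => cur.contains "objection" = false
  | some d => cur = d ∧ cur.contains "objection" = true

theorem pvA_run (ls : List String) : ∀ (strats : List (List (String × String)))
    (cur : PySem.Dict String String) (copt : Option (PySem.Dict String String)),
    pvRel cur copt →
    (let fin := ls.foldl pvAStep (strats, cur)
     if fin.2.contains "objection" then fin.1 ++ [fin.2.items] else fin.1)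
      = strats ++ pvRun copt ls := by
  induction ls with
  | nil =>
    intro strats cur copt hrel
    cases copt with
    | none => simp only [pvRel] at hrel; simp [pvRun, pvFlush, hrel]
    | some d =>
      obtain ⟨rfl, h2⟩ := hrel
      simp [pvRun, pvFlush, h2]
  | cons raw ls ih =>
    intro strats cur copt hrel
    simp only [List.foldl_cons]
    by_cases hs : PySem.Str.strip raw = ""
    · -- blank line
      cases copt with
      | none =>
        simp only [pvRel] at hrel
        have hstep : pvAStep (strats, cur) raw = (strats, cur) := by
          unfold pvAStep; simp [hs, hrel]
        rw [hstep, ih strats cur none hrel]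
        simp [pvRun, pvFlush, hs]
      | some d =>
        obtain ⟨rfl, h2⟩ := hrel
        have hstep : pvAStep (strats, cur) raw = (strats ++ [cur.items], PySem.Dict.empty) := by
          unfold pvAStep; simp [hs, h2]
        rw [hstep, ih (strats ++ [cur.items]) PySem.Dict.empty none (by simp [pvRel])]
        simp [pvRun, pvFlush, hs]
    · by_cases hobj : pvIsObj (PySem.Str.strip raw) = true
      · -- objection line
        have hstep : pvAStep (strats, cur) raw =
            ((if cur.contains "objection" then strats ++ [cur.items] else strats),
             PySem.Dict.ofList [("objection", pvAfter (PySem.Str.strip raw))]) := by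
          unfold pvAStep; simp [hs, hobj]
        rw [hstep]
        have hnewrel : pvRel (PySem.Dict.ofList [("objection", pvAfter (PySem.Str.strip raw))])
            (some (PySem.Dict.ofList [("objection", pvAfter (PySem.Str.strip raw))])) := by
          constructor
          · rfl
          · simp [PySem.Dict.ofList, PySem.Dict.update]
        rw [ih _ _ _ hnewrel]
        cases copt with
        | none =>
          simp only [pvRel] at hrel
          simp [pvRun, pvFlush, hs, hobj, hrel]
        | some d =>
          obtain ⟨rfl, h2⟩ := hrel
          simp [pvRun, pvFlush, hs, hobj, h2, List.append_assoc]
      · by_cases hresp : pvIsResp (PySem.Str.strip raw) = true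
        · -- response line
          have hstep : pvAStep (strats, cur) raw =
              (strats, cur.insert "response" (pvAfter (PySem.Str.strip raw))) := by
            unfold pvAStep; simp [hs, hobj, hresp]
          rw [hstep]
          cases copt with
          | none =>
            simp only [pvRel] at hrel
            have hrel' : pvRel (cur.insert "response" (pvAfter (PySem.Str.strip raw))) none := by
              simp only [pvRel]
              rw [PySem.Dict.contains_insert]
              simp [hrel]
            rw [ih _ _ _ hrel']
            simp [pvRun, hs, hobj, hresp]
          | some d =>
            obtain ⟨rfl, h2⟩ := hrel
            have hrel' : pvRel (cur.insert "response" (pvAfter (PySem.Str.strip raw)))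
                (some (cur.insert "response" (pvAfter (PySem.Str.strip raw)))) := by
              refine ⟨rfl, ?_⟩
              rw [PySem.Dict.contains_insert]
              simp [h2]
            rw [ih _ _ _ hrel']
            simp [pvRun, hs, hobj, hresp]
        · -- irrelevant line
          have hstep : pvAStep (strats, cur) raw = (strats, cur) := by
            unfold pvAStep; simp [hs, hobj, hresp]
          rw [hstep, ih _ _ _ hrel]
          simp [pvRun, hs, hobj, hresp]

theorem pvInner_shift (b : List String) : ∀ (acc : List (List (String × String)))
    (copt : Option (PySem.Dict String String)),
    b.foldl pvInner (acc, copt)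
      = (acc ++ (b.foldl pvInner ([], copt)).1, (b.foldl pvInner ([], copt)).2) := by
  induction b with
  | nil => intro acc copt; simp
  | cons s b ih =>
    intro acc copt
    have hstep : ∀ (a : List (List (String × String))),
        pvInner (a, copt) s = (a ++ (pvInner ([], copt) s).1, (pvInner ([], copt) s).2) := by
      intro a; unfold pvInner; cases copt <;> split_ifs <;> simp
    simp only [List.foldl_cons]
    rw [hstep acc, hstep []]
    simp only [List.nil_append]
    rw [ih (acc ++ (pvInner ([], copt) s).1) (pvInner ([], copt) s).2,
        ih (pvInner ([], copt) s).1 (pvInner ([], copt) s).2]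
    simp

theorem pvProc_shift (acc : List (List (String × String))) (b : List String) :
    pvProc acc b = acc ++ pvProc [] b := by
  unfold pvProc
  rw [pvInner_shift b acc none]
  cases hc : (b.foldl pvInner ([], none)).2 <;> simp [hc]

theorem pvOuter_append (bs : List (List String)) (b : List String) :
    (bs ++ [b]).foldl pvProc [] = bs.foldl pvProc [] ++ pvProc [] b := by
  rw [List.foldl_append]
  simp only [List.foldl_cons, List.foldl_nil]
  exact pvProc_shift _ _

theorem pvB_run (ls : List String) : ∀ (bs : List (List String)) (cur : List String),
    (let st := ls.foldl pvBlockStep (bs, cur)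
     let blocks := if st.2 ≠ [] then st.1 ++ [st.2] else st.1
     blocks.foldl pvProc [])
      = bs.foldl pvProc []
        ++ (cur.foldl pvInner ([], none)).1
        ++ pvRun (cur.foldl pvInner ([], none)).2 ls := by
  induction ls with
  | nil =>
    intro bs cur
    simp only [List.foldl_nil]
    by_cases h : cur = []
    · subst h; simp [pvRun, pvFlush]
    · simp only [ne_eq, h, not_false_eq_true, if_pos]
      rw [pvOuter_append]
      unfold pvProc
      cases hc : (cur.foldl pvInner ([], none)).2 <;>
        simp [pvRun, pvFlush, hc, List.append_assoc]
  | cons raw ls ih =>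
    intro bs cur
    simp only [List.foldl_cons]
    by_cases hs : PySem.Str.strip raw = ""
    · -- blank line: close the current block (if nonempty)
      by_cases h : cur = []
      · have hstep : pvBlockStep (bs, cur) raw = (bs, cur) := by
          unfold pvBlockStep; simp [hs, h]
        rw [hstep, ih bs cur]
        subst h
        simp [pvRun, pvFlush, hs]
      · have hstep : pvBlockStep (bs, cur) raw = (bs ++ [cur], []) := by
          unfold pvBlockStep; simp [hs, h]
        rw [hstep, ih (bs ++ [cur]) [], pvOuter_append]
        unfold pvProc
        cases hc : (cur.foldl pvInner ([], none)).2 <;>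
          simp [pvRun, pvFlush, hc, hs, List.append_assoc]
    · -- non-blank line: extend the current block
      have hstep : pvBlockStep (bs, cur) raw = (bs, cur ++ [PySem.Str.strip raw]) := by
        unfold pvBlockStep; simp [hs]
      rw [hstep, ih bs (cur ++ [PySem.Str.strip raw])]
      have hext : (cur ++ [PySem.Str.strip raw]).foldl pvInner ([], none)
          = pvInner (cur.foldl pvInner ([], none)) (PySem.Str.strip raw) := by
        simp [List.foldl_append]
      rw [hext]
      cases hE : cur.foldl pvInner ([], none) with
      | mk r1 r2 =>
        by_cases hobj : pvIsObj (PySem.Str.strip raw) = true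
        · cases r2 <;>
            simp [pvInner, pvRun, pvFlush, hs, hobj, List.append_assoc]
        · by_cases hresp : pvIsResp (PySem.Str.strip raw) = true
          · cases r2 <;>
              simp [pvInner, pvRun, hs, hobj, hresp]
          · cases r2 <;>
              simp [pvInner, pvRun, hs, hobj, hresp]

-- ===== VERDICT (by name: the statement is the Claim_ definition above) =====
theorem parse_counters_py_spec : Claim_equal_parse_counters_py := by
  intro text _
  unfold Spec_parse_counters_py parse_counters_py parse_counters_py_alt
  have hA := pvA_run ((PySem.Str.split? text "\n").getD []) [] PySem.Dict.empty none
    (by simp [pvRel])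
  have hB := pvB_run ((PySem.Str.split? text "\n").getD []) [] []
  simp only [List.foldl_nil, List.nil_append] at hA hB
  simp only [hA, hB]
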